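-- pv_equiv track=rewrite | github.com/yuiseo/ProblemSolving | 프로그래머스/unrated/138476. 귤 고르기/귤 고르기.py | solution
-- ===== SOURCE A (Python) =====
-- def solution(k, tangerine):
--     answer = 0
--     d = dict()
--
--     for i in list(set(tangerine)):
--         d[i]=0
--     for t in tangerine:
--         d[t]+=1
--
--     new = sorted(d.items(),key=lambda x:x[1], reverse=True)
--     for n in new:
--         if k>0:
--             k-=n[1]
--             answer+=1
--         else:
--             break
--
--
--     return answer
-- ===== SOURCE B (Python) =====
-- def solution(k, tangerine):
--     # counting-sort style: frequency histogram scanned from the largest count down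
--     freq = {}
--     for t in tangerine:
--         freq[t] = freq.get(t, 0) + 1
--     bucket = {}
--     for c in freq.values():
--         bucket[c] = bucket.get(c, 0) + 1
--     answer = 0
--     f = max(bucket, default=0)
--     while f > 0:
--         for _ in range(bucket.get(f, 0)):
--             if k <= 0:
--                 return answer
--             k -= f
--             answer += 1
--         f -= 1
--     return answer
-- ===== Notes on version B (the rewrite author's own statement) =====
-- stated objective: alternative
-- what changed: A builds a count dict and comparison-sorts its items by count descending, then greedily takes boxes; B instead builds a histogram of the counts (bucket[c] = number of types occurring c times) and walks it from the largest count down, taking boxes one at a time with the same k>0 stop rule - a counting-sort-style scan with no comparison sort.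
import Mathlib
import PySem

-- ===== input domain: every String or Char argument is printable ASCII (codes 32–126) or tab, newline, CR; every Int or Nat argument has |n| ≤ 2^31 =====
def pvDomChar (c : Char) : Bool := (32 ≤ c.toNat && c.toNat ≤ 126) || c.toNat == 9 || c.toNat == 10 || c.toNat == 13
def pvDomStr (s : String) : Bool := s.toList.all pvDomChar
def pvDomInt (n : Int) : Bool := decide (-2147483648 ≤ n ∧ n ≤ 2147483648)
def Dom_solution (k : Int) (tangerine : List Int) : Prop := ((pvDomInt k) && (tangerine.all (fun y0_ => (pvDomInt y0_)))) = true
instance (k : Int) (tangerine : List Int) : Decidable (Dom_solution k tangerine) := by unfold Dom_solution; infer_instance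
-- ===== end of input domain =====

-- B replaces A's comparison sort of the (type, count) pairs by a histogram of counts scanned
-- from the largest count downwards (counting-sort style); same return value, no speed claim.

-- ===== PORT A =====
-- 'for n in new: if k>0: … else: break' — a loop with break, as structural recursion
def pvLoopA : Int → Int → List (Int × Int) → Int
  | _, ans, [] => ans
  | k, ans, n :: rest => if k > 0 then pvLoopA (k - n.2) (ans + 1) rest else ans

def solution (k : Int) (tangerine : List Int) : Int :=
  -- d = {}; for i in list(set(tangerine)): d[i] = 0
  let d0 : PySem.Dict Int Int :=
    (PySem.Set.ofList tangerine).foldl (fun d i => d.insert i 0) PySem.Dict.empty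
  -- for t in tangerine: d[t] += 1   (every t was seeded above, so no KeyError; modify is exact here)
  let d := tangerine.foldl (fun d t => d.modify t 0 (· + 1)) d0
  -- new = sorted(d.items(), key=lambda x: x[1], reverse=True)
  let new := PySem.List.sorted d.items (fun x => x.2) true
  pvLoopA k 0 new

-- ===== PORT B =====
-- 'for _ in range(bucket.get(f, 0)): if k <= 0: return answer; …' — inner loop; Sum.inr = early return
def pvInnerB (f : Int) : Nat → Int → Int → (Int × Int) ⊕ Int
  | 0, k, ans => Sum.inl (k, ans)
  | n + 1, k, ans => if k ≤ 0 then Sum.inr ans else pvInnerB f n (k - f) (ans + 1)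

-- 'while f > 0: …; f -= 1' — f runs n+1, n, …, 1
def pvOuterB (bucket : PySem.Dict Int Int) : Nat → Int → Int → Int
  | 0, _, ans => ans
  | n + 1, k, ans =>
    match pvInnerB ((n : Int) + 1) (bucket.getD ((n : Int) + 1) 0).toNat k ans with
    | Sum.inl (k', ans') => pvOuterB bucket n k' ans'
    | Sum.inr a => a

def solution_alt (k : Int) (tangerine : List Int) : Int :=
  -- freq = {}; for t in tangerine: freq[t] = freq.get(t, 0) + 1
  let freq : PySem.Dict Int Int :=
    tangerine.foldl (fun d t => d.insert t (d.getD t 0 + 1)) PySem.Dict.empty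
  -- bucket = {}; for c in freq.values(): bucket[c] = bucket.get(c, 0) + 1
  let bucket : PySem.Dict Int Int :=
    freq.values.foldl (fun d c => d.insert c (d.getD c 0 + 1)) PySem.Dict.empty
  -- f = max(bucket, default=0)
  let f := PySem.List.maxD bucket.keys (fun x => x) 0
  pvOuterB bucket f.toNat k 0

-- ===== PRECONDITION & SPEC =====
def Spec_solution (k : Int) (tangerine : List Int) (out : Int) : Prop := out = solution_alt k tangerine
instance (k : Int) (tangerine : List Int) (out : Int) : Decidable (Spec_solution k tangerine out) := by unfold Spec_solution; infer_instance

-- ===== CLAIM (what is proved, stated in full; the proofs are below) =====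
def Claim_equal_solution : Prop := ∀ (k : Int) (tangerine : List Int), Dom_solution k tangerine → Spec_solution k tangerine (solution k tangerine)

-- ===== LEMMAS AND PROOFS =====

-- the common greedy: take counts in the given order while k > 0
def pvGreedy : Int → Int → List Int → Int
  | _, ans, [] => ans
  | k, ans, c :: rest => if k > 0 then pvGreedy (k - c) (ans + 1) rest else ans

-- the descending count sequence B effectively walks: counts n, n-1, …, 1, each with its multiplicity
def pvDesc (bucket : PySem.Dict Int Int) : Nat → List Int
  | 0 => []
  | n + 1 => List.replicate (bucket.getD ((n : Int) + 1) 0).toNat ((n : Int) + 1) ++ pvDesc bucket n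

theorem pvLoopA_eq_greedy (l : List (Int × Int)) (k ans : Int) :
    pvLoopA k ans l = pvGreedy k ans (l.map (·.2)) := by
  induction l generalizing k ans with
  | nil => rfl
  | cons p rest ih =>
    simp only [pvLoopA, List.map, pvGreedy]
    by_cases h : k > 0 <;> simp [h, ih]

theorem pvGreedy_replicate (f : Int) (n : Nat) (rest : List Int) (k ans : Int) :
    pvGreedy k ans (List.replicate n f ++ rest) =
      (match pvInnerB f n k ans with
       | Sum.inl (k', ans') => pvGreedy k' ans' rest
       | Sum.inr a => a) := by
  induction n generalizing k ans with
  | zero => rfl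
  | succ n ih =>
    simp only [List.replicate_succ, List.cons_append, pvGreedy, pvInnerB]
    by_cases h : k ≤ 0
    · simp [h, not_lt.mpr h]
    · simp [h, lt_of_not_ge h, ih]

theorem pvOuterB_eq_greedy (bucket : PySem.Dict Int Int) (fuel : Nat) (k ans : Int) :
    pvOuterB bucket fuel k ans = pvGreedy k ans (pvDesc bucket fuel) := by
  induction fuel generalizing k ans with
  | zero => rfl
  | succ n ih =>
    simp only [pvOuterB, pvDesc, pvGreedy_replicate]
    cases pvInnerB ((n : Int) + 1) (bucket.getD ((n : Int) + 1) 0).toNat k ans with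
    | inl p => simp [ih]
    | inr a => rfl

theorem pvDesc_mem_bounds (bucket : PySem.Dict Int Int) (n : Nat) :
    ∀ x ∈ pvDesc bucket n, 1 ≤ x ∧ x ≤ (n : Int) := by
  induction n with
  | zero => simp [pvDesc]
  | succ n ih =>
    intro x hx
    simp only [pvDesc, List.mem_append] at hx
    rcases hx with hx | hx
    · have := List.eq_of_mem_replicate hx
      subst this
      constructor <;> omega
    · have := ih x hx
      push_cast
      omega

theorem pvDesc_pairwise (bucket : PySem.Dict Int Int) (n : Nat) :
    (pvDesc bucket n).Pairwise (fun a b => b ≤ a) := by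
  induction n with
  | zero => simp [pvDesc]
  | succ n ih =>
    simp only [pvDesc]
    rw [List.pairwise_append]
    refine ⟨?_, ih, ?_⟩
    · apply List.pairwise_replicate.mpr
      simp
    · intro a ha b hb
      have ha' := List.eq_of_mem_replicate ha
      have hb' := (pvDesc_mem_bounds bucket n b hb).2
      omega

theorem pvDesc_count (bucket : PySem.Dict Int Int) (n : Nat) (x : Int) :
    (pvDesc bucket n).count x =
      if 1 ≤ x ∧ x ≤ (n : Int) then (bucket.getD x 0).toNat else 0 := by
  induction n with
  | zero => simp [pvDesc]; omega
  | succ n ih =>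
    have hrep : ∀ (c : Nat),
        (List.replicate c ((n : Int) + 1)).count x = if x = (n : Int) + 1 then c else 0 := by
      intro c
      by_cases h : x = (n : Int) + 1
      · simp [h]
      · simp [List.count_replicate, h]
        intro h'
        exact absurd h'.symm h
    simp only [pvDesc, List.count_append, hrep, ih]
    by_cases hx : x = (n : Int) + 1
    · subst hx
      rw [if_pos rfl, if_neg (by omega), if_pos (by push_cast; omega)]
      omega
    · rw [if_neg hx]
      by_cases hc : 1 ≤ x ∧ x ≤ (n : Int)
      · rw [if_pos hc, if_pos (by push_cast; omega)]
        omega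
      · rw [if_neg hc, if_neg (by push_cast; omega)]

-- Set.update with already-present elements is the identity
theorem pvSet_update_of_mem {s : PySem.Set Int} {l : List Int} (h : ∀ x ∈ l, x ∈ s) :
    PySem.Set.update s l = s := by
  induction l generalizing s with
  | nil => rfl
  | cons a t ih =>
    have : PySem.Set.update s (a :: t) = PySem.Set.update (s.add a) t := rfl
    rw [this, PySem.Set.add_of_mem (h a (by simp))]
    exact ih (fun x hx => h x (by simp [hx]))

-- A's dict: items of the zero-seeding loop
theorem pvSeed_items (tangerine : List Int) :
    ((PySem.Set.ofList tangerine).foldl (fun d i => d.insert i (0 : Int))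
        PySem.Dict.empty).items
      = (PySem.Set.ofList tangerine).map (fun i => (i, (0 : Int))) := by
  have h := PySem.Dict.items_foldl_insert_fresh (l := PySem.Set.ofList tangerine)
      (k := fun i => i) (v := fun _ => (0 : Int)) (d := PySem.Dict.empty)
      (by intro a _; simp [PySem.Dict.contains_empty])
      (by simp [PySem.Set.nodup_ofList])
  simpa using h

-- A's dict equals the counter on its keys: getD v 0 = count v tangerine
theorem pvA_dict_getD (tangerine : List Int) (v : Int) :
    ((tangerine.foldl (fun d t => d.modify t 0 (· + 1))
        ((PySem.Set.ofList tangerine).foldl (fun d i => d.insert i (0 : Int))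
          PySem.Dict.empty))).getD v 0 = (tangerine.count v : Int) := by
  set d0 := (PySem.Set.ofList tangerine).foldl (fun d i => d.insert i (0 : Int))
      PySem.Dict.empty with hd0
  have hkeys0 : d0.keys = PySem.Set.ofList tangerine := by
    rw [hd0]
    simp [PySem.Dict.keys, pvSeed_items, List.map_map, Function.comp_def]
  have h0 : d0.getD v 0 = 0 := by
    by_cases hv : v ∈ PySem.Set.ofList tangerine
    · have hit : (v, (0 : Int)) ∈ d0.items := by
        rw [hd0, pvSeed_items]
        exact List.mem_map.mpr ⟨v, hv, rfl⟩
      exact PySem.Dict.getD_of_mem_items d0 hit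
        (by rw [hkeys0]; exact PySem.Set.nodup_ofList tangerine) 0
    · apply PySem.Dict.getD_of_not_contains
      have : ¬ (d0.contains v = true) := by
        rw [PySem.Dict.contains_iff_mem_keys, hkeys0]
        exact hv
      simpa using this
  rw [PySem.Dict.getD_foldl_modify_add_one, h0, zero_add]

theorem pvA_dict_keys (tangerine : List Int) :
    ((tangerine.foldl (fun d t => d.modify t 0 (· + 1))
        ((PySem.Set.ofList tangerine).foldl (fun d i => d.insert i (0 : Int))
          PySem.Dict.empty))).keys = PySem.Set.ofList tangerine := by
  rw [PySem.Dict.keys_foldl_modify]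
  have : ((PySem.Set.ofList tangerine).foldl (fun d i => d.insert i (0 : Int))
      PySem.Dict.empty).keys = PySem.Set.ofList tangerine := by
    simp [PySem.Dict.keys, pvSeed_items, List.map_map, Function.comp_def]
  rw [this]
  exact pvSet_update_of_mem (fun x hx => (PySem.Set.mem_ofList _ _).mpr hx)

-- A's values are exactly the counts of the distinct elements
theorem pvA_dict_values (tangerine : List Int) :
    ((tangerine.foldl (fun d t => d.modify t 0 (· + 1))
        ((PySem.Set.ofList tangerine).foldl (fun d i => d.insert i (0 : Int))
          PySem.Dict.empty))).values
      = (PySem.Set.ofList tangerine).map (fun v => (tangerine.count v : Int)) := by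
  set d := tangerine.foldl (fun d t => d.modify t 0 (· + 1))
      ((PySem.Set.ofList tangerine).foldl (fun d i => d.insert i (0 : Int))
        PySem.Dict.empty) with hd
  have hk : d.keys = PySem.Set.ofList tangerine := pvA_dict_keys tangerine
  have hnd : d.keys.Nodup := by rw [hk]; exact PySem.Set.nodup_ofList tangerine
  rw [PySem.Dict.values_eq_map_keys d hnd 0, hk]
  apply List.map_congr_left
  intro v _
  exact pvA_dict_getD tangerine v

-- B's vals list
theorem pvB_freq_values (tangerine : List Int) :
    (tangerine.foldl (fun d t => d.insert t (d.getD t 0 + 1))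
        (PySem.Dict.empty : PySem.Dict Int Int)).values
      = (PySem.Set.ofList tangerine).map (fun v => (tangerine.count v : Int)) := by
  rw [PySem.Dict.foldl_insert_getD_add_one_eq_counter]
  simp [PySem.Dict.values, PySem.Dict.items_counter, List.map_map, Function.comp_def]

-- main bridge: A's sorted count sequence IS B's descending histogram walk
theorem pv_main (tangerine : List Int) :
    ((PySem.List.sorted
        (tangerine.foldl (fun d t => d.modify t 0 (· + 1))
          ((PySem.Set.ofList tangerine).foldl (fun d i => d.insert i (0 : Int))
            PySem.Dict.empty)).items (fun x => x.2) true).map (·.2))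
      = pvDesc
          ((((PySem.Set.ofList tangerine).map (fun v => (tangerine.count v : Int))).foldl
            (fun d c => d.insert c (d.getD c 0 + 1)) (PySem.Dict.empty : PySem.Dict Int Int)))
          (PySem.List.maxD
            ((((PySem.Set.ofList tangerine).map (fun v => (tangerine.count v : Int))).foldl
              (fun d c => d.insert c (d.getD c 0 + 1)) (PySem.Dict.empty : PySem.Dict Int Int))).keys
            (fun x => x) 0).toNat := by
  set vals := (PySem.Set.ofList tangerine).map (fun v => (tangerine.count v : Int)) with hvals
  set d := tangerine.foldl (fun d t => d.modify t 0 (· + 1))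
      ((PySem.Set.ofList tangerine).foldl (fun d i => d.insert i (0 : Int))
        PySem.Dict.empty) with hd
  rw [PySem.Dict.foldl_insert_getD_add_one_eq_counter]
  set bucket := PySem.Dict.counter vals with hbucket
  set m := PySem.List.maxD bucket.keys (fun x => x) 0 with hm
  -- every element of vals is ≥ 1 and ≤ m
  have hvpos : ∀ v ∈ vals, 1 ≤ v := by
    intro v hv
    rw [hvals] at hv
    obtain ⟨x, hx, rfl⟩ := List.mem_map.mp hv
    have : x ∈ tangerine := (PySem.Set.mem_ofList _ _).mp hx
    have := List.count_pos_iff.mpr this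
    omega
  have hkeys : bucket.keys = PySem.Set.ofList vals := PySem.Dict.keys_counter vals
  have hvle : ∀ v ∈ vals, v ≤ m := by
    intro v hv
    have hvk : v ∈ bucket.keys := by rw [hkeys]; exact (PySem.Set.mem_ofList _ _).mpr hv
    rw [hm]
    unfold PySem.List.maxD
    cases hmax : PySem.List.max? bucket.keys (fun x => x) with
    | none =>
      exfalso
      rw [PySem.List.max?_eq_none_iff] at hmax
      rw [hmax] at hvk
      exact absurd hvk (List.not_mem_nil)
    | some w =>
      simpa using PySem.List.max?_isMax hmax v hvk
  have hm0 : 0 ≤ m := by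
    rw [hm]
    unfold PySem.List.maxD
    cases hmax : PySem.List.max? bucket.keys (fun x => x) with
    | none => simp
    | some w =>
      have hw : w ∈ bucket.keys := PySem.List.max?_mem hmax
      rw [hkeys] at hw
      have := hvpos w ((PySem.Set.mem_ofList _ _).mp hw)
      simpa using by omega
  -- the two lists are permutations of each other
  have hperm : ((PySem.List.sorted d.items (fun x => x.2) true).map (·.2)).Perm
      (pvDesc bucket m.toNat) := by
    have h1 : ((PySem.List.sorted d.items (fun x => x.2) true).map (·.2)).Perm d.values := by
      exact (PySem.List.sorted_perm d.items (fun x => x.2) true).map (·.2)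
    have h2 : d.values = vals := pvA_dict_values tangerine
    have h3 : vals.Perm (pvDesc bucket m.toNat) := by
      rw [List.perm_iff_count]
      intro a
      rw [pvDesc_count]
      by_cases ha : a ∈ vals
      · have h4 : 1 ≤ a ∧ a ≤ ((m.toNat : Nat) : Int) := by
          have := hvpos a ha
          have := hvle a ha
          constructor
          · omega
          · omega
        rw [if_pos h4, hbucket, PySem.Dict.getD_counter]
        simp
      · have h5 : vals.count a = 0 := List.count_eq_zero.mpr ha
        rw [h5]
        by_cases h6 : 1 ≤ a ∧ a ≤ ((m.toNat : Nat) : Int)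
        · rw [if_pos h6, hbucket, PySem.Dict.getD_counter, h5]
          simp
        · rw [if_neg h6]
      
    exact (h1.trans (h2 ▸ List.Perm.refl vals)).trans h3
  -- both are sorted in descending order, so they are equal
  have hs1 : ((PySem.List.sorted d.items (fun x => x.2) true).map (·.2)).Pairwise
      (fun a b => b ≤ a) := by
    have := PySem.List.sorted_pairwise_rev d.items (fun x => x.2)
    exact List.Pairwise.map (fun p : Int × Int => p.2) (fun a b h => h) this
  have hs2 : (pvDesc bucket m.toNat).Pairwise (fun a b => b ≤ a) :=
    pvDesc_pairwise bucket m.toNat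
  exact List.Perm.eq_of_pairwise
    (fun a b _ _ h1 h2 => le_antisymm h2 h1) hs1 hs2 hperm

-- ===== VERDICT (by name: the statement is the Claim_ definition above) =====
theorem solution_spec : Claim_equal_solution := by
  intro k tangerine _
  show solution k tangerine = solution_alt k tangerine
  simp only [solution, solution_alt]
  rw [pvLoopA_eq_greedy, pvOuterB_eq_greedy, pvB_freq_values, pv_main]
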